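-- pv_equiv track=rewrite | github.com/ShenChen1/our-factory-acm | 2019-tt/topic2/python/hiker.py | count_right_numbers
-- ===== SOURCE A (Python) =====
-- def count_right_numbers(s):
--     z = int
--     r = 0
--     u = [-1]
--     N = [[0]*11 for i in s]
--     def f(a, i):
--         n = N[i][a]
--         if n < 1:
--             n = 1
--             j = i + 1
--             if j < len(s):
--                 w = z(s[j])
--                 t = a + w
--                 m = t // 2
--                 n = f(m, j) + t % 2 * f(m + 1, j)
--                 if abs(w - z(s[i])) > 1:
--                     u[0] = 0
--         N[i][a] = n
--         return n
--     for n in range(10):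
--         r += f(n, 0)
--     return r + u[0]
-- ===== SOURCE B (Python) =====
-- def count_right_numbers(s):
--     # Bottom-up DP over an 11-wide accumulator table, filled from the last
--     # position backwards, plus a direct adjacency scan for the -1/0 bias.
--     n = len(s)
--     if n == 1:
--         return 9  # base case: every start digit 0..9 yields one sequence, plus bias -1
--     d = [int(c) for c in s]
--     dp = [1] * 11
--     for i in reversed(range(n - 1)):
--         t0 = d[i + 1]
--         dp = [dp[(a + t0) // 2] + (a + t0) % 2 * dp[(a + t0) // 2 + 1] for a in range(11)]
--     bias = 0 if any(abs(d[i + 1] - d[i]) > 1 for i in range(n - 1)) else -1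
--     return sum(dp[:10]) + bias
-- ===== Notes on version B (the rewrite author's own statement) =====
-- stated objective: alternative
-- what changed: Replaces A's memoized top-down recursion with a mutable table and a side-effect flag by a bottom-up iterative DP that fills one 11-wide row per position from the end, and computes the -1/0 bias by a direct adjacency scan instead of A's u[0] flag set inside the recursion.
import Mathlib
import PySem

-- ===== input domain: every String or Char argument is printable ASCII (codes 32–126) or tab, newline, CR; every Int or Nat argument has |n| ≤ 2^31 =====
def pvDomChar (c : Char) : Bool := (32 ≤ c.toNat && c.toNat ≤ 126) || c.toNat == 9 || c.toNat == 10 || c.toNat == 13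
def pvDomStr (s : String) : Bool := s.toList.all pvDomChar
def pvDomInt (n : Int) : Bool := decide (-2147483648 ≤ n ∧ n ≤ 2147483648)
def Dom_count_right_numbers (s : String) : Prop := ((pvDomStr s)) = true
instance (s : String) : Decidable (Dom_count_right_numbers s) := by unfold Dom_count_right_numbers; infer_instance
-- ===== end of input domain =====

-- B replaces A's memoized top-down recursion (mutable memo table + u[0] side-effect flag) by a
-- bottom-up iterative DP filling one 11-wide row per position from the end, with the -1/0 bias
-- computed by a direct adjacency scan (objective: alternative; same cost, different algorithm).

-- ===== PORT A =====
-- int(one-character-string); exact on the digit characters Pre_ admits (elsewhere Python raises ValueError)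
def pvCharInt (c : Char) : Int := (PySem.Int.ofChars? [c]).getD 0

-- the inner memoized f(a, i): returns (n, N, u), threading the memo table N and the u[0] flag.
-- Indexing N[i][a] via getD/toNat: under Pre_ always 0 ≤ a ≤ 10 and i < len(s), so exact.
def pvA_f (sl : List Char) (a : Int) (i : Nat) (N : List (List Int)) (u : Int) :
    Int × List (List Int) × Int :=
  let n0 := (N.getD i []).getD a.toNat 0
  let r : Int × List (List Int) × Int :=
    if n0 < 1 then
      if h : i + 1 < sl.length then
        let w := pvCharInt (sl[i+1]'h)
        let t := a + w
        let m := PySem.Int.floordiv t 2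
        let r1 := pvA_f sl m (i+1) N u
        let r2 := pvA_f sl (m+1) (i+1) r1.2.1 r1.2.2
        (r1.1 + PySem.Int.mod t 2 * r2.1, r2.2.1,
         if 1 < |w - pvCharInt (sl[i]'(Nat.lt_of_succ_lt h))| then 0 else r2.2.2)
      else (1, N, u)
    else (n0, N, u)
  (r.1, r.2.1.set i ((r.2.1.getD i []).set a.toNat r.1), r.2.2)
termination_by sl.length - i
decreasing_by all_goals omega

def count_right_numbers (s : String) : Int :=
  let sl := s.toList
  let N0 := sl.map (fun _ => List.replicate 11 (0 : Int))     -- N = [[0]*11 for i in s]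
  let st := (PySem.List.pyRange 0 10 1).foldl                 -- for n in range(10): r += f(n, 0)
      (fun (st : Int × List (List Int) × Int) nn =>
        let r := pvA_f sl nn 0 st.2.1 st.2.2
        (st.1 + r.1, r.2.1, r.2.2))
      ((0 : Int), N0, (-1 : Int))
  st.1 + st.2.2                                               -- return r + u[0]

-- ===== PORT B =====
-- one row of the bottom-up table:
-- [dp[(a+d[i+1])//2] + (a+d[i+1])%2 * dp[(a+d[i+1])//2 + 1] for a in range(11)]
-- (list indices via getD/toNat: the quotient lies in 0..9 for the digit inputs Pre_ admits)
def pvB_row (d : List Int) (dp : List Int) (i : Nat) : List Int :=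
  (List.range 11).map (fun (a : Nat) =>
    let t := (a : Int) + d.getD (i + 1) 0
    let m := (PySem.Int.floordiv t 2).toNat
    dp.getD m 0 + PySem.Int.mod t 2 * dp.getD (m + 1) 0)

def count_right_numbers_alt (s : String) : Int :=
  let n := s.toList.length
  if n = 1 then 9                                             -- if len(s) == 1: return 9
  else
    let d := s.toList.map pvCharInt                           -- d = [int(c) for c in s]
    let dp := ((List.range (n - 1)).reverse).foldl (pvB_row d) (List.replicate 11 1)
                                                              -- for i in reversed(range(n-1)): dp = [...]
    let bias : Int :=
      if (List.range (n - 1)).any (fun i => 1 < |d.getD (i + 1) 0 - d.getD i 0|) then 0 else -1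
    (dp.take 10).sum + bias                                   -- return sum(dp[:10]) + bias

-- ===== PRECONDITION & SPEC =====
-- Pre_ excludes exactly the inputs where Python A raises: the empty string (IndexError on the
-- empty memo table) and strings of length ≥ 2 containing a non-digit character (ValueError in int()).
def Pre_count_right_numbers (s : String) : Prop :=
  s.toList ≠ [] ∧ (s.toList.length = 1 ∨ s.toList.all (fun c => c.isDigit) = true)
instance (s : String) : Decidable (Pre_count_right_numbers s) := by
  unfold Pre_count_right_numbers; infer_instance
def pvWitness_count_right_numbers : String := "1201"

def Spec_count_right_numbers (s : String) (out : Int) : Prop := out = count_right_numbers_alt s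
instance (s : String) (out : Int) : Decidable (Spec_count_right_numbers s out) := by
  unfold Spec_count_right_numbers; infer_instance

-- ===== CLAIM (what is proved, stated in full; the proofs are below) =====
def Claim_equal_count_right_numbers : Prop := ∀ (s : String), Dom_count_right_numbers s →
  Pre_count_right_numbers s → Spec_count_right_numbers s (count_right_numbers s)
-- ===== LEMMAS AND PROOFS =====

theorem pvCharInt_digit {c : Char} (h : c.isDigit = true) : 0 ≤ pvCharInt c ∧ pvCharInt c ≤ 9 := by
  have h48 : 48 ≤ c.toNat ∧ c.toNat ≤ 57 := by
    simp [Char.isDigit] at h; exact ⟨h.1, h.2⟩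
  have hc : c = Char.ofNat c.toNat := (Char.ofNat_toNat c).symm
  have : c.toNat = 48 ∨ c.toNat = 49 ∨ c.toNat = 50 ∨ c.toNat = 51 ∨ c.toNat = 52 ∨ c.toNat = 53
      ∨ c.toNat = 54 ∨ c.toNat = 55 ∨ c.toNat = 56 ∨ c.toNat = 57 := by omega
  rcases this with h|h|h|h|h|h|h|h|h|h <;> rw [h] at hc <;> subst hc <;> decide

def pvF (d : List Int) (a : Int) (i : Nat) : Int :=
  if i + 1 < d.length then
    let t := a + d.getD (i + 1) 0
    let m := PySem.Int.floordiv t 2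
    pvF d m (i + 1) + PySem.Int.mod t 2 * pvF d (m + 1) (i + 1)
  else 1
termination_by d.length - i
decreasing_by all_goals omega

def pvBad (d : List Int) (k : Nat) : Prop := k + 1 < d.length ∧ 1 < |d.getD (k + 1) 0 - d.getD k 0|
def pvBadFrom (d : List Int) (i : Nat) : Prop := ∃ k, i ≤ k ∧ pvBad d k
-- digit bounds are only ever needed at indices ≥ 1 (s[j] with j = i+1); index 0 is never converted when len = 1
def pvDigits (d : List Int) : Prop := ∀ k, 1 ≤ k → k < d.length → 0 ≤ d.getD k 0 ∧ d.getD k 0 ≤ 9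
def pvMemV (d : List Int) (N : List (List Int)) : Prop :=
  N.length = d.length ∧ (∀ i, i < d.length → (N.getD i []).length = 11) ∧
  ∀ i a', i < d.length → a' < 11 →
    (N.getD i []).getD a' 0 = 0 ∨ (N.getD i []).getD a' 0 = pvF d (a' : Int) i
def pvTouched (N : List (List Int)) (i : Nat) : Prop := ∃ a', a' < 11 ∧ (N.getD i []).getD a' 0 ≠ 0
def pvInv (d : List Int) (N : List (List Int)) (u : Int) : Prop :=
  (∀ k, k < d.length → pvTouched N k → pvBadFrom d k → u = 0) ∧ (u = 0 → pvBadFrom d 0)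

theorem getD_set_self {α} (l : List α) (i : Nat) (x : α) (d : α) (h : i < l.length) :
    (l.set i x).getD i d = x := by
  simp [List.getD_eq_getElem?_getD, h]
theorem getD_set_ne {α} (l : List α) (i j : Nat) (x : α) (d : α) (h : j ≠ i) :
    (l.set i x).getD j d = l.getD j d := by
  rw [List.getD_eq_getElem?_getD, List.getElem?_set, if_neg (fun hh => h hh.symm),
    List.getD_eq_getElem?_getD]
theorem getD_map_self {α β} (l : List α) (f : α → β) (k : Nat) (d : β) (h : k < l.length) :
    (l.map f).getD k d = f (l[k]'h) := by
  simp [List.getD_eq_getElem?_getD, List.getElem?_map, List.getElem?_eq_getElem h]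

theorem pvF_base (d : List Int) (a : Int) (i : Nat) (h : ¬ i + 1 < d.length) : pvF d a i = 1 := by
  rw [pvF]; simp [h]
theorem pvF_step (d : List Int) (a : Int) (i : Nat) (h : i + 1 < d.length) :
    pvF d a i = pvF d (PySem.Int.floordiv (a + d.getD (i+1) 0) 2) (i + 1) +
      PySem.Int.mod (a + d.getD (i+1) 0) 2 *
        pvF d (PySem.Int.floordiv (a + d.getD (i+1) 0) 2 + 1) (i + 1) := by
  rw [pvF]; simp [h]
theorem pvMid (a w : Int) (ha : 0 ≤ a) (ha' : a ≤ 10) (hw : 0 ≤ w) (hw' : w ≤ 9) :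
    0 ≤ PySem.Int.floordiv (a + w) 2 ∧ PySem.Int.floordiv (a + w) 2 ≤ 9 ∧
    0 ≤ PySem.Int.mod (a + w) 2 ∧ PySem.Int.mod (a + w) 2 ≤ 1 := by
  rw [PySem.Int.floordiv_eq_ediv_of_pos (by omega), PySem.Int.mod_eq_emod_of_pos (by omega)]
  omega
theorem pvF_pos (d : List Int) (hd : pvDigits d) :
    ∀ n i (a : Int), d.length - i ≤ n → 0 ≤ a → a ≤ 10 → 1 ≤ pvF d a i := by
  intro n
  induction n with
  | zero => intro i a hn _ _; rw [pvF_base d a i (by omega)]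
  | succ n ih =>
    intro i a hn ha ha'
    by_cases h : i + 1 < d.length
    · rw [pvF_step d a i h]
      obtain ⟨hw, hw'⟩ := hd (i+1) (by omega) h
      obtain ⟨h1, h2, h3, h4⟩ := pvMid a (d.getD (i+1) 0) ha ha' hw hw'
      have p1 := ih (i+1) _ (by omega) h1 (by omega)
      have p2 := ih (i+1) _ (by omega) (by omega)
        (by omega : PySem.Int.floordiv (a + d.getD (i+1) 0) 2 + 1 ≤ 10)
      nlinarith
    · rw [pvF_base d a i h]

theorem pvBadFrom_mono (d : List Int) {i j : Nat} (h : i ≤ j) : pvBadFrom d j → pvBadFrom d i := by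
  rintro ⟨k, hk, hb⟩; exact ⟨k, by omega, hb⟩
theorem pvBadFrom_last (d : List Int) {i : Nat} (h : ¬ i + 1 < d.length) : ¬ pvBadFrom d i := by
  rintro ⟨k, hk, hk1, _⟩; omega
theorem pvBadFrom_succ (d : List Int) (i : Nat) (_h : i + 1 < d.length) :
    pvBadFrom d i ↔ pvBad d i ∨ pvBadFrom d (i + 1) := by
  constructor
  · rintro ⟨k, hk, hb⟩
    rcases Nat.eq_or_lt_of_le hk with rfl | hlt
    · exact Or.inl hb
    · exact Or.inr ⟨k, by omega, hb⟩
  · rintro (hb | ⟨k, hk, hb⟩)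
    · exact ⟨i, le_refl _, hb⟩
    · exact ⟨k, by omega, hb⟩

theorem pvTouched_set_ne (N : List (List Int)) (i k : Nat) (r : List Int) (h : k ≠ i) :
    pvTouched (N.set i r) k ↔ pvTouched N k := by
  unfold pvTouched; rw [getD_set_ne _ _ _ _ _ h]

-- the i-row update N[i][a] = v
theorem pvMemV_update (d : List Int) (N : List (List Int)) (hM : pvMemV d N) (i : Nat) (a : Int)
    (ha : 0 ≤ a) (ha10 : a ≤ 10) (hi : i < d.length) (v : Int) (hv : v = pvF d a i) (hv1 : 1 ≤ v) :
    pvMemV d (N.set i ((N.getD i []).set a.toNat v)) ∧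
    pvTouched (N.set i ((N.getD i []).set a.toNat v)) i := by
  obtain ⟨hL, hR, hE⟩ := hM
  have hiN : i < N.length := by omega
  have haN : a.toNat < 11 := by omega
  have hrow : (N.set i ((N.getD i []).set a.toNat v)).getD i [] = (N.getD i []).set a.toNat v :=
    getD_set_self _ _ _ _ hiN
  have hcast : ((a.toNat : Int)) = a := Int.toNat_of_nonneg ha
  refine ⟨⟨by simpa using hL, ?_, ?_⟩, ?_⟩
  · intro k hk
    by_cases hki : k = i
    · subst hki; rw [hrow, List.length_set]; exact hR k hk
    · rw [getD_set_ne _ _ _ _ _ hki]; exact hR k hk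
  · intro k a' hk ha'
    by_cases hki : k = i
    · subst hki; rw [hrow]
      by_cases haa : a' = a.toNat
      · subst haa
        rw [getD_set_self _ _ _ _ (by rw [hR k hk]; omega)]
        right; rw [hcast, ← hv]
      · rw [getD_set_ne _ _ _ _ _ haa]; exact hE k a' hk ha'
    · rw [getD_set_ne _ _ _ _ _ hki]; exact hE k a' hk ha'
  · exact ⟨a.toNat, haN, by rw [hrow, getD_set_self _ _ _ _ (by rw [hR i hi]; omega)]; omega⟩

theorem pvA_f_spec (sl : List Char) (d : List Int) (hd : d = sl.map pvCharInt)
    (hdig : pvDigits d) :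
    ∀ n i (a : Int) N u, sl.length - i ≤ n → i < sl.length → 0 ≤ a → a ≤ 10 →
    pvMemV d N → (u = -1 ∨ u = 0) → pvInv d N u →
    (pvA_f sl a i N u).1 = pvF d a i ∧
    pvMemV d (pvA_f sl a i N u).2.1 ∧
    ((pvA_f sl a i N u).2.2 = -1 ∨ (pvA_f sl a i N u).2.2 = 0) ∧
    pvInv d (pvA_f sl a i N u).2.1 (pvA_f sl a i N u).2.2 ∧
    ((pvA_f sl a i N u).2.2 = 0 ↔ (u = 0 ∨ pvBadFrom d i)) ∧
    pvTouched (pvA_f sl a i N u).2.1 i := by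
  have hlen : d.length = sl.length := by rw [hd]; simp
  intro n
  induction n with
  | zero => intro i a N u hn hi; omega
  | succ n ih =>
    intro i a N u hn hi ha ha10 hM hu hInv
    have hid : i < d.length := by omega
    have hcast : ((a.toNat : Int)) = a := Int.toNat_of_nonneg ha
    by_cases hc : (N.getD i []).getD a.toNat 0 < 1
    · -- fresh
      by_cases h : i + 1 < sl.length
      · -- recursive case
        have hid1 : i + 1 < d.length := by omega
        have heq : pvA_f sl a i N u =
            (let w := pvCharInt (sl[i+1]'h)
             let t := a + w
             let m := PySem.Int.floordiv t 2
             let r1 := pvA_f sl m (i+1) N u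
             let r2 := pvA_f sl (m+1) (i+1) r1.2.1 r1.2.2
             let v := r1.1 + PySem.Int.mod t 2 * r2.1
             (v, r2.2.1.set i ((r2.2.1.getD i []).set a.toNat v),
              if 1 < |w - pvCharInt (sl[i]'(Nat.lt_of_succ_lt h))| then 0 else r2.2.2)) := by
          rw [pvA_f]; simp only [if_pos hc, dif_pos h]
        rw [heq]
        have hwd : d.getD (i+1) 0 = pvCharInt (sl[i+1]'h) := by
          rw [hd]; exact getD_map_self sl pvCharInt (i+1) 0 h
        have hwd0 : d.getD i 0 = pvCharInt (sl[i]'(Nat.lt_of_succ_lt h)) := by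
          rw [hd]; exact getD_map_self sl pvCharInt i 0 (Nat.lt_of_succ_lt h)
        obtain ⟨hw0, hw9⟩ := hdig (i+1) (by omega) hid1
        obtain ⟨hm0, hm9, hmod0, hmod1⟩ :=
          pvMid a (d.getD (i+1) 0) ha ha10 hw0 hw9
        rw [hwd] at hm0 hm9 hmod0 hmod1
        have P1 := ih (i+1) (PySem.Int.floordiv (a + pvCharInt (sl[i+1]'h)) 2) N u
          (by omega) (by omega) hm0 (by omega) hM hu hInv
        obtain ⟨P1v, P1M, P1u, P1I, P1iff, P1t⟩ := P1
        have P2 := ih (i+1) (PySem.Int.floordiv (a + pvCharInt (sl[i+1]'h)) 2 + 1)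
          (pvA_f sl _ (i+1) N u).2.1 (pvA_f sl _ (i+1) N u).2.2
          (by omega) (by omega) (by omega) (by omega) P1M P1u P1I
        obtain ⟨P2v, P2M, P2u, P2I, P2iff, P2t⟩ := P2
        set r1 := pvA_f sl (PySem.Int.floordiv (a + pvCharInt (sl[i+1]'h)) 2) (i+1) N u with hr1
        set r2 := pvA_f sl (PySem.Int.floordiv (a + pvCharInt (sl[i+1]'h)) 2 + 1) (i+1)
          r1.2.1 r1.2.2 with hr2
        simp only []
        have hval : r1.1 + PySem.Int.mod (a + pvCharInt (sl[i+1]'h)) 2 * r2.1 = pvF d a i := by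
          rw [P1v, P2v, pvF_step d a i hid1, hwd]
        have hpos : 1 ≤ pvF d a i :=
          pvF_pos d hdig (d.length - i) i a (le_refl _) ha ha10
        have hbadi : (1 < |pvCharInt (sl[i+1]'h) - pvCharInt (sl[i]'(Nat.lt_of_succ_lt h))|)
            ↔ pvBad d i := by
          unfold pvBad; rw [hwd, hwd0]; constructor
          · exact fun hh => ⟨hid1, hh⟩
          · exact fun hh => hh.2
        have hUP := pvMemV_update d r2.2.1 P2M i a ha ha10 hid
          (r1.1 + PySem.Int.mod (a + pvCharInt (sl[i+1]'h)) 2 * r2.1) hval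
          (by rw [hval]; exact hpos)
        -- the final u value
        by_cases hcond : 1 < |pvCharInt (sl[i+1]'h) - pvCharInt (sl[i]'(Nat.lt_of_succ_lt h))|
        · -- u3 = 0
          rw [if_pos hcond]
          refine ⟨hval, hUP.1, Or.inr rfl, ⟨?_, ?_⟩, ?_, hUP.2⟩
          · intro k _ _ _; rfl
          · intro _; exact pvBadFrom_mono d (Nat.zero_le i) ⟨i, le_refl i, hbadi.mp hcond⟩
          · simp only [true_iff]
            exact Or.inr ⟨i, le_refl i, hbadi.mp hcond⟩
        · rw [if_neg hcond]
          have hiff : r2.2.2 = 0 ↔ (u = 0 ∨ pvBadFrom d i) := by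
            rw [P2iff, P1iff, pvBadFrom_succ d i hid1]
            constructor
            · rintro ((h0 | hB) | hB)
              · exact Or.inl h0
              · exact Or.inr (Or.inr hB)
              · exact Or.inr (Or.inr hB)
            · rintro (h0 | (hB | hB))
              · exact Or.inl (Or.inl h0)
              · exact absurd (hbadi.mpr hB) hcond
              · exact Or.inr hB
          refine ⟨hval, hUP.1, P2u, ⟨?_, ?_⟩, hiff, hUP.2⟩
          · intro k hk ht hB
            by_cases hki : k = i
            · subst hki
              exact hiff.mpr (Or.inr hB)
            · rw [pvTouched_set_ne _ _ _ _ hki] at ht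
              exact P2I.1 k hk ht hB
          · intro h0
            rcases hiff.mp h0 with h0' | hB
            · exact hInv.2 h0'
            · exact pvBadFrom_mono d (Nat.zero_le i) hB
      · -- base case: j = len
        have heq : pvA_f sl a i N u = (1, N.set i ((N.getD i []).set a.toNat 1), u) := by
          rw [pvA_f]; simp only [if_pos hc, dif_neg h]
        rw [heq]
        have hnb : ¬ i + 1 < d.length := by omega
        have hF1 : pvF d a i = 1 := pvF_base d a i hnb
        have hUP := pvMemV_update d N hM i a ha ha10 hid 1 hF1.symm (le_refl _)
        refine ⟨hF1.symm, hUP.1, hu, ⟨?_, hInv.2⟩, ?_, hUP.2⟩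
        · intro k hk ht hB
          by_cases hki : k = i
          · subst hki; exact absurd hB (pvBadFrom_last d hnb)
          · rw [pvTouched_set_ne _ _ _ _ hki] at ht
            exact hInv.1 k hk ht hB
        · constructor
          · exact fun h0 => Or.inl h0
          · rintro (h0 | hB)
            · exact h0
            · exact absurd hB (pvBadFrom_last d hnb)
    · -- cached
      have heq : pvA_f sl a i N u = ((N.getD i []).getD a.toNat 0,
          N.set i ((N.getD i []).set a.toNat ((N.getD i []).getD a.toNat 0)), u) := by
        rw [pvA_f]; simp only [if_neg hc]
      rw [heq]
      have hE := hM.2.2 i a.toNat hid (by omega)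
      have hval : (N.getD i []).getD a.toNat 0 = pvF d a i := by
        rcases hE with h0 | hF
        · omega
        · rw [hF, hcast]
      have htch : pvTouched N i := ⟨a.toNat, by omega, by omega⟩
      have hUP := pvMemV_update d N hM i a ha ha10 hid _ hval (by omega)
      refine ⟨hval, hUP.1, hu, ⟨?_, hInv.2⟩, ?_, hUP.2⟩
      · intro k hk ht hB
        by_cases hki : k = i
        · subst hki; exact hInv.1 _ hid htch hB
        · rw [pvTouched_set_ne _ _ _ _ hki] at ht
          exact hInv.1 k hk ht hB
      · constructor
        · exact fun h0 => Or.inl h0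
        · rintro (h0 | hB)
          · exact h0
          · exact hInv.1 i hid htch hB
theorem pvA_loop (sl : List Char) (d : List Int) (hd : d = sl.map pvCharInt)
    (hdig : pvDigits d) (hne : sl ≠ []) :
    ∀ (L : List Int), (∀ x ∈ L, 0 ≤ x ∧ x ≤ 10) → ∀ (r : Int) N (u : Int),
    pvMemV d N → (u = -1 ∨ u = 0) → pvInv d N u →
    (L.foldl (fun (st : Int × List (List Int) × Int) nn =>
        let r := pvA_f sl nn 0 st.2.1 st.2.2
        (st.1 + r.1, r.2.1, r.2.2)) (r, N, u)).1
      = r + (L.map (fun a => pvF d a 0)).sum ∧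
    ((L.foldl (fun (st : Int × List (List Int) × Int) nn =>
        let r := pvA_f sl nn 0 st.2.1 st.2.2
        (st.1 + r.1, r.2.1, r.2.2)) (r, N, u)).2.2 = 0 ↔
      (u = 0 ∨ (L ≠ [] ∧ pvBadFrom d 0))) ∧
    ((L.foldl (fun (st : Int × List (List Int) × Int) nn =>
        let r := pvA_f sl nn 0 st.2.1 st.2.2
        (st.1 + r.1, r.2.1, r.2.2)) (r, N, u)).2.2 = -1 ∨
     (L.foldl (fun (st : Int × List (List Int) × Int) nn =>
        let r := pvA_f sl nn 0 st.2.1 st.2.2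
        (st.1 + r.1, r.2.1, r.2.2)) (r, N, u)).2.2 = 0) := by
  intro L
  induction L with
  | nil => intro _ r N u hM hu hI; exact ⟨by simp, by simp, hu⟩
  | cons x L ih =>
    intro hmem r N u hM hu hI
    have hx := hmem x (List.mem_cons_self)
    have h0 : 0 < sl.length := List.length_pos_iff.mpr hne
    have P := pvA_f_spec sl d hd hdig sl.length 0 x N u (by omega) h0 hx.1 hx.2 hM hu hI
    obtain ⟨Pv, PM, Pu, PI, Piff, _⟩ := P
    have IH := ih (fun y hy => hmem y (List.mem_cons_of_mem _ hy))
      (r + (pvA_f sl x 0 N u).1) (pvA_f sl x 0 N u).2.1 (pvA_f sl x 0 N u).2.2 PM Pu PI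
    obtain ⟨IHv, IHiff, IHu⟩ := IH
    simp only [List.foldl_cons]
    refine ⟨?_, ?_, IHu⟩
    · rw [IHv, Pv]; simp [List.map_cons, List.sum_cons]; ring
    · rw [IHiff, Piff]
      constructor
      · rintro ((h|h)|⟨_,h⟩)
        · exact Or.inl h
        · exact Or.inr ⟨List.cons_ne_nil _ _, h⟩
        · exact Or.inr ⟨List.cons_ne_nil _ _, h⟩
      · rintro (h|⟨_,h⟩)
        · exact Or.inl (Or.inl h)
        · exact Or.inl (Or.inr h)

theorem pvA_char (s : String) (hne : s.toList ≠ [])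
    (hdig : pvDigits (s.toList.map pvCharInt)) :
    ∃ u' : Int, count_right_numbers s =
      ((PySem.List.pyRange 0 10 1).map (fun a => pvF (s.toList.map pvCharInt) a 0)).sum + u' ∧
      (u' = 0 ↔ pvBadFrom (s.toList.map pvCharInt) 0) ∧ (u' = -1 ∨ u' = 0) := by
  have hlen : (s.toList.map pvCharInt).length = s.toList.length := by simp
  have hrep : ∀ a' : Nat, (List.replicate 11 (0:Int)).getD a' 0 = 0 := by
    intro a'
    rw [List.getD_eq_getElem?_getD, List.getElem?_replicate]
    split <;> rfl
  have hM0 : pvMemV (s.toList.map pvCharInt) (s.toList.map (fun _ => List.replicate 11 (0:Int))) := by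
    refine ⟨by simp, ?_, ?_⟩
    · intro i hi
      rw [getD_map_self _ _ i _ (by omega)]; simp
    · intro i a' hi ha'
      rw [getD_map_self _ _ i _ (by omega)]
      exact Or.inl (hrep a')
  have hI0 : pvInv (s.toList.map pvCharInt) (s.toList.map (fun _ => List.replicate 11 (0:Int))) (-1) := by
    constructor
    · intro k hk ht _
      exfalso; obtain ⟨a', ha', hne'⟩ := ht
      rw [getD_map_self _ _ k _ (by omega)] at hne'
      exact hne' (hrep a')
    · intro h; omega
  have hmem : ∀ x ∈ PySem.List.pyRange 0 10 1, (0:Int) ≤ x ∧ x ≤ 10 := by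
    intro x hx
    rw [PySem.List.mem_pyRange_one] at hx; omega
  have L := pvA_loop s.toList (s.toList.map pvCharInt) rfl hdig hne
    (PySem.List.pyRange 0 10 1) hmem 0 (s.toList.map (fun _ => List.replicate 11 (0:Int))) (-1)
    hM0 (Or.inl rfl) hI0
  obtain ⟨Lv, Liff, Lu⟩ := L
  have hnn : PySem.List.pyRange 0 10 1 ≠ [] := by decide
  refine ⟨_, ?_, ?_, Lu⟩
  · show _ + _ = _
    rw [Lv]; ring
  · rw [Liff]
    constructor
    · rintro ((h|⟨_,h⟩)); · omega
      · exact h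
    · intro h; exact Or.inr ⟨hnn, h⟩
def pvRowOf (d : List Int) (j : Nat) : List Int := (List.range 11).map (fun (a : Nat) => pvF d (a : Int) j)

theorem getD_map_range (f : Nat → Int) (m : Nat) (hm : m < 11) :
    ((List.range 11).map f).getD m 0 = f m := by
  rw [getD_map_self _ _ m _ (by simpa using hm)]
  simp

theorem pvB_row_step (d : List Int) (hdig : pvDigits d) (i : Nat) (h : i + 1 < d.length) :
    pvB_row d (pvRowOf d (i + 1)) i = pvRowOf d i := by
  apply List.ext_getElem (by simp [pvB_row, pvRowOf])
  intro k h1 h2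
  have hk : k < 11 := by simpa [pvB_row] using h1
  obtain ⟨hw0, hw9⟩ := hdig (i + 1) (by omega) h
  obtain ⟨hm0, hm9, _, _⟩ := pvMid (k : Int) (d.getD (i+1) 0) (by positivity)
    (by exact_mod_cast (by omega : k ≤ 10)) hw0 hw9
  simp only [pvB_row, pvRowOf, List.getElem_map, List.getElem_range]
  rw [getD_map_range _ _ (by omega), getD_map_range _ _ (by omega)]
  rw [pvF_step d (k : Int) i h]
  congr 2
  · exact Int.toNat_of_nonneg hm0
  · push_cast [Int.toNat_of_nonneg hm0]; ring

theorem pvB_fold (d : List Int) (hdig : pvDigits d) :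
    ∀ j, j < d.length →
      ((List.range j).reverse).foldl (pvB_row d) (pvRowOf d j) = pvRowOf d 0 := by
  intro j
  induction j with
  | zero => intro _; simp
  | succ j ih =>
    intro hj
    rw [List.range_succ, List.reverse_append]
    simp only [List.reverse_cons, List.reverse_nil, List.nil_append, List.cons_append,
      List.foldl_cons]
    rw [pvB_row_step d hdig j hj]
    exact ih (by omega)

theorem pvRowOf_last (d : List Int) (hne : d ≠ []) :
    pvRowOf d (d.length - 1) = List.replicate 11 1 := by
  have hlen : 0 < d.length := List.length_pos_iff.mpr hne
  unfold pvRowOf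
  rw [List.eq_replicate_iff]
  refine ⟨by simp, ?_⟩
  intro x hx
  rw [List.mem_map] at hx
  obtain ⟨a, _, rfl⟩ := hx
  exact pvF_base d _ _ (by omega)

theorem pvSum_bridge (d : List Int) :
    ((PySem.List.pyRange 0 10 1).map (fun a => pvF d a 0)).sum = ((pvRowOf d 0).take 10).sum := by
  rw [PySem.List.pyRange_one, pvRowOf]
  rw [← List.map_take, List.take_range]
  rw [List.map_map]
  norm_num [Function.comp_def]
  rfl

theorem pvMain (s : String) (hne : s.toList ≠ [])
    (hcase : s.toList.length = 1 ∨ ∀ c ∈ s.toList, c.isDigit = true) :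
    count_right_numbers s = count_right_numbers_alt s := by
  set d := s.toList.map pvCharInt with hd
  have hdl : d.length = s.toList.length := by simp [hd]
  have hn1 : 1 ≤ s.toList.length := by
    have := List.length_pos_iff.mpr hne; omega
  have hdig : pvDigits d := by
    rcases hcase with h1 | hall
    · intro k hk1 hk; omega
    · intro k _ hk
      rw [hd, getD_map_self _ _ k _ (by omega)]
      exact pvCharInt_digit (hall _ (List.getElem_mem _))
  obtain ⟨u', hAv, hAiff, hAu⟩ := pvA_char s hne hdig
  rw [← hd] at hAv hAiff
  by_cases hlen1 : s.toList.length = 1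
  · have hB : count_right_numbers_alt s = 9 := by
      simp [count_right_numbers_alt, hlen1]
    have hF1 : ∀ a : Int, pvF d a 0 = 1 := fun a => pvF_base d a 0 (by omega)
    have hnb : ¬ pvBadFrom d 0 := by
      rintro ⟨k, _, hk1, _⟩; omega
    have hu' : u' = -1 := by
      rcases hAu with h | h
      · exact h
      · exact absurd (hAiff.mp h) hnb
    have hr : PySem.List.pyRange 0 10 1 = [0,1,2,3,4,5,6,7,8,9] := by decide
    rw [hB, hAv, hu', hr]
    simp [hF1]
  · -- length ≥ 2
    have hlen2 : 2 ≤ s.toList.length := by omega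
    have hB : count_right_numbers_alt s =
        ((pvRowOf d 0).take 10).sum +
        (if (List.range (s.toList.length - 1)).any
            (fun i => 1 < |d.getD (i + 1) 0 - d.getD i 0|) then (0:Int) else -1) := by
      simp only [count_right_numbers_alt, if_neg hlen1, ← hd]
      have hseed : (List.replicate 11 (1:Int)) = pvRowOf d (s.toList.length - 1) := by
        rw [← pvRowOf_last d (by intro h; rw [h] at hdl; simp only [List.length_nil] at hdl; omega), hdl]
      rw [hseed, pvB_fold d hdig (s.toList.length - 1) (by omega)]
    have hbad : ((List.range (s.toList.length - 1)).any
        (fun i => 1 < |d.getD (i + 1) 0 - d.getD i 0|) = true) ↔ pvBadFrom d 0 := by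
      rw [List.any_eq_true]
      constructor
      · rintro ⟨i, hi, hp⟩
        rw [List.mem_range] at hi
        rw [decide_eq_true_iff] at hp
        exact ⟨i, Nat.zero_le _, by omega, hp⟩
      · rintro ⟨k, _, hk1, hk2⟩
        exact ⟨k, List.mem_range.mpr (by omega), decide_eq_true_iff.mpr hk2⟩
    have hu' : u' = (if (List.range (s.toList.length - 1)).any
        (fun i => 1 < |d.getD (i + 1) 0 - d.getD i 0|) then (0:Int) else -1) := by
      by_cases hb : (List.range (s.toList.length - 1)).any
          (fun i => 1 < |d.getD (i + 1) 0 - d.getD i 0|) = true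
      · rw [if_pos hb]; exact hAiff.mpr (hbad.mp hb)
      · rw [if_neg hb]
        rcases hAu with h | h
        · exact h
        · exact absurd (hbad.mpr (hAiff.mp h)) hb
    rw [hAv, hB, pvSum_bridge d, hu']

-- ===== VERDICT (by name: the statement is the Claim_ definition above) =====
theorem count_right_numbers_spec : Claim_equal_count_right_numbers := by
  intro s _ hpre
  unfold Spec_count_right_numbers
  refine pvMain s hpre.1 ?_
  rcases hpre.2 with h | h
  · exact Or.inl h
  · exact Or.inr (fun c hc => List.all_eq_true.mp h c hc)
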